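-- pv_equiv track=rewrite | github.com/NEU-SNS/ReverseTraceroutePublic | rankingservice/algorithms/rr_heuristics.py | compute_ip_loop
-- ===== SOURCE A (Python) =====
-- def compute_ip_loop(rr_ip_hops):
--     count_by_ip = {}
--     for i, (rr_ip, rr_hop) in enumerate(rr_ip_hops):
--         if rr_ip not in count_by_ip:
--             count_by_ip[rr_ip] = i
--         else:
--             if count_by_ip[rr_ip] == i - 1:
--                 # This is not a loop, just a double stamp
--                 continue
--             # Be conservative on the index loop, take the first IP
--             # so that there is no loop in the subpath
--             return i, rr_ip_hops[i]
--     return None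
-- ===== SOURCE B (Python) =====
-- def compute_ip_loop(rr_ip_hops):
--     # Pass 1: first-occurrence index of each IP.
--     first = {}
--     for i, (rr_ip, _) in enumerate(rr_ip_hops):
--         if rr_ip not in first:
--             first[rr_ip] = i
--     # Pass 2: first index whose IP was first seen at least two hops earlier.
--     for i, pair in enumerate(rr_ip_hops):
--         if first[pair[0]] <= i - 2:
--             return i, pair
--     return None
-- ===== Notes on version B (the rewrite author's own statement) =====
-- stated objective: alternative
-- what changed: Replaces the interleaved build-and-check single pass with two passes: first build a complete first-occurrence index table, then scan for the first index i with first_occurrence[ip] <= i-2.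
import Mathlib
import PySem

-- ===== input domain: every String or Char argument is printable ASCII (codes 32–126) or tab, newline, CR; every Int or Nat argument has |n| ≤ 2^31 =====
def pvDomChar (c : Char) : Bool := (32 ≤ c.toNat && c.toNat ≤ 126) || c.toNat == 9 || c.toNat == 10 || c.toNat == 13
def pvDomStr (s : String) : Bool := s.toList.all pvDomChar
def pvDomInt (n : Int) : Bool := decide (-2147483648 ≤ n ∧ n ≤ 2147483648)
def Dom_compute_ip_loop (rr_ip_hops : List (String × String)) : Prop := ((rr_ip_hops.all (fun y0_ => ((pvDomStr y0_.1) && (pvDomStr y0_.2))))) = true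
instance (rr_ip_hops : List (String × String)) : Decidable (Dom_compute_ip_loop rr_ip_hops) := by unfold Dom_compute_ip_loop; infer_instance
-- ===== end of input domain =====

-- B replaces A's interleaved build-and-check single pass with a first-occurrence
-- table built in one full pass followed by a separate arithmetic scan (objective: alternative).


-- ===== PORT A =====
-- The enumerate loop; `rr_ip_hops[i]` in the return is exactly the current pair
-- (i is the enumerate index of that pair), so it is ported as the current pair.
def pvLoopA : List (String × String) → PySem.Dict String Int → Int → Option (Int × (String × String))
  | [], _, _ => none
  | (rr_ip, rr_hop) :: rest, count_by_ip, i =>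
    match count_by_ip.get? rr_ip with
    | none => pvLoopA rest (count_by_ip.insert rr_ip i) (i + 1)
    | some j => if j = i - 1 then pvLoopA rest count_by_ip (i + 1)
                else some (i, (rr_ip, rr_hop))

def compute_ip_loop (rr_ip_hops : List (String × String)) : Option (Int × (String × String)) :=
  pvLoopA rr_ip_hops PySem.Dict.empty 0

-- ===== PORT B =====
-- Pass 1: first-occurrence index of each IP (never overwritten).
def pvBuildFirst : List (String × String) → Int → PySem.Dict String Int → PySem.Dict String Int
  | [], _, first => first
  | (rr_ip, _) :: rest, i, first =>
    pvBuildFirst rest (i + 1) (if first.contains rr_ip then first else first.insert rr_ip i)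

-- Pass 2: first index i with first[ip] <= i-2. Python's `first[pair[0]]` cannot
-- miss (every ip of the list is a key of `first`); the lookup is ported as getD _ 0.
def pvScanB (first : PySem.Dict String Int) : List (String × String) → Int → Option (Int × (String × String))
  | [], _ => none
  | pair :: rest, i =>
    if first.getD pair.1 0 ≤ i - 2 then some (i, pair) else pvScanB first rest (i + 1)

def compute_ip_loop_alt (rr_ip_hops : List (String × String)) : Option (Int × (String × String)) :=
  pvScanB (pvBuildFirst rr_ip_hops 0 PySem.Dict.empty) rr_ip_hops 0

-- ===== PRECONDITION & SPEC =====
def Spec_compute_ip_loop (rr_ip_hops : List (String × String)) (out : Option (Int × (String × String))) : Prop := out = compute_ip_loop_alt rr_ip_hops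
instance (rr_ip_hops : List (String × String)) (out : Option (Int × (String × String))) : Decidable (Spec_compute_ip_loop rr_ip_hops out) := by unfold Spec_compute_ip_loop; infer_instance

-- ===== CLAIM (what is proved, stated in full; the proofs are below) =====
def Claim_equal_compute_ip_loop : Prop := ∀ (rr_ip_hops : List (String × String)), Dom_compute_ip_loop rr_ip_hops → Spec_compute_ip_loop rr_ip_hops (compute_ip_loop rr_ip_hops)

-- ===== LEMMAS AND PROOFS =====

-- Index of the first occurrence of `ip` among the first components.
def pvFirstIdx : List (String × String) → String → Option Nat
  | [], _ => none
  | (a, _) :: rest, ip => if a = ip then some 0 else (pvFirstIdx rest ip).map (· + 1)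

theorem pvFirstIdx_lt {l : List (String × String)} {ip : String} {j : Nat}
    (h : pvFirstIdx l ip = some j) : j < l.length := by
  induction l generalizing j with
  | nil => simp [pvFirstIdx] at h
  | cons x rest ih =>
    simp only [pvFirstIdx] at h
    split at h
    · cases h; simp
    · cases hr : pvFirstIdx rest ip with
      | none => rw [hr] at h; simp at h
      | some k =>
        rw [hr] at h; simp at h
        have := ih hr
        simp [← h]; omega

theorem pvFirstIdx_append_some {p : List (String × String)} {ip : String} {j : Nat}
    (q : List (String × String)) (h : pvFirstIdx p ip = some j) :
    pvFirstIdx (p ++ q) ip = some j := by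
  induction p generalizing j with
  | nil => simp [pvFirstIdx] at h
  | cons a t ih =>
    simp only [pvFirstIdx, List.cons_append] at h ⊢
    split at h
    · simp_all
    · cases ht : pvFirstIdx t ip with
      | none => rw [ht] at h; simp at h
      | some k =>
        rw [ht] at h
        simp_all [ih ht]

theorem pvFirstIdx_append_none {p : List (String × String)} {ip : String}
    (q : List (String × String)) (h : pvFirstIdx p ip = none) :
    pvFirstIdx (p ++ q) ip = (pvFirstIdx q ip).map (· + p.length) := by
  induction p with
  | nil => simp
  | cons a t ih =>
    simp only [pvFirstIdx, List.cons_append] at h ⊢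
    split at h
    · simp at h
    · rename_i ha
      rw [Option.map_eq_none_iff] at h
      simp only [ha, if_false, ih h]
      cases pvFirstIdx q ip with
      | none => simp
      | some k => simp; omega

-- The dict built by B's first pass looks up to the first-occurrence index.
theorem pvBuildFirst_get? (l : List (String × String)) (i : Int) (d : PySem.Dict String Int)
    (ip : String) :
    (pvBuildFirst l i d).get? ip =
      match d.get? ip with
      | some j => some j
      | none => (pvFirstIdx l ip).map (fun k => i + (k : Int)) := by
  induction l generalizing i d with
  | nil => cases h : d.get? ip <;> simp [pvBuildFirst, pvFirstIdx, h]
  | cons x rest ih =>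
    obtain ⟨a, hop⟩ := x
    simp only [pvBuildFirst, ih]
    cases hc : d.contains a with
    | true =>
      simp only [if_true]
      cases h : d.get? ip with
      | some j => simp
      | none =>
        simp only [pvFirstIdx]
        by_cases ha : a = ip
        · exfalso
          rw [PySem.Dict.contains_eq_isSome_get?] at hc
          rw [ha, h] at hc; simp at hc
        · simp only [ha, if_false]
          cases pvFirstIdx rest ip <;> (simp; try ring)
    | false =>
      simp only [Bool.false_eq_true, if_false]
      have hda : d.get? a = none := by
        rw [PySem.Dict.contains_eq_isSome_get?] at hc
        cases h : d.get? a with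
        | none => rfl
        | some v => rw [h] at hc; simp at hc
      rw [PySem.Dict.get?_insert]
      by_cases hip : ip = a
      · subst hip
        simp only [hda, pvFirstIdx]
        simp
      · simp only [if_neg hip]
        cases h : d.get? ip with
        | some j => simp
        | none =>
          simp only [pvFirstIdx]
          have hne : ¬ a = ip := fun h' => hip h'.symm
          simp only [hne, if_false]
          cases pvFirstIdx rest ip <;> (simp; try ring)

-- Main invariant: with d = first occurrences of the prefix p and D = first
-- occurrences of the whole list, A's remaining loop equals B's remaining scan.
theorem pvKey (full : List (String × String)) (D : PySem.Dict String Int)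
    (hD : ∀ ip, D.get? ip = (pvFirstIdx full ip).map (fun k => (k : Int))) :
    ∀ (rest p : List (String × String)) (d : PySem.Dict String Int),
      full = p ++ rest →
      (∀ ip, d.get? ip = (pvFirstIdx p ip).map (fun k => (k : Int))) →
      pvLoopA rest d (p.length : Int) = pvScanB D rest (p.length : Int) := by
  intro rest
  induction rest with
  | nil => intro p d _ _; simp [pvLoopA, pvScanB]
  | cons x rest ih =>
    intro p d hfull hd
    obtain ⟨ip, hop⟩ := x
    have hfull' : full = (p ++ [(ip, hop)]) ++ rest := by simp [hfull]
    have hdip := hd ip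
    have hgetD : D.getD ip 0 = (D.get? ip).getD 0 := PySem.Dict.getD_eq_get?_getD D ip 0
    have hlen : ((p ++ [(ip, hop)]).length : Int) = (p.length : Int) + 1 := by
      simp
    simp only [pvLoopA, pvScanB, hdip]
    cases hp : pvFirstIdx p ip with
    | none =>
      -- new ip: A inserts it; B sees first[ip] = p.length, no trigger
      have hsn : pvFirstIdx (p ++ [(ip, hop)]) ip = some p.length := by
        rw [pvFirstIdx_append_none _ hp]; simp [pvFirstIdx]
      have hfi : pvFirstIdx full ip = some p.length := by
        rw [hfull']; exact pvFirstIdx_append_some _ hsn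
      have hDv : D.getD ip 0 = (p.length : Int) := by
        rw [hgetD, hD ip, hfi]; simp
      rw [hDv]
      have hcond : ¬ ((p.length : Int) ≤ (p.length : Int) - 2) := by omega
      simp only [if_neg hcond]
      have := ih (p ++ [(ip, hop)]) (d.insert ip (p.length : Int)) hfull' (by
        intro ip'
        rw [PySem.Dict.get?_insert]
        by_cases hip' : ip' = ip
        · subst hip'
          rw [if_pos rfl, pvFirstIdx_append_none _ hp]
          simp [pvFirstIdx]
        · have hne : ¬ ip = ip' := fun h => hip' h.symm
          rw [if_neg hip', hd ip']
          cases h' : pvFirstIdx p ip' with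
          | some j => rw [pvFirstIdx_append_some _ h']
          | none =>
            rw [pvFirstIdx_append_none _ h']
            simp [pvFirstIdx, hne])
      rw [hlen] at this
      exact this
    | some j =>
      have hjlt : j < p.length := pvFirstIdx_lt hp
      have hfi : pvFirstIdx full ip = some j := by
        rw [hfull', pvFirstIdx_append_some _ (pvFirstIdx_append_some _ hp)]
      have hDv : D.getD ip 0 = (j : Int) := by rw [hgetD, hD ip, hfi]; simp
      rw [hDv]
      show (if (j : Int) = (p.length : Int) - 1 then pvLoopA rest d ((p.length : Int) + 1)
              else some ((p.length : Int), (ip, hop))) =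
           (if (j : Int) ≤ (p.length : Int) - 2 then some ((p.length : Int), (ip, hop))
              else pvScanB D rest ((p.length : Int) + 1))
      by_cases hdbl : (j : Int) = (p.length : Int) - 1
      · -- double stamp: both continue
        have hcond : ¬ ((j : Int) ≤ (p.length : Int) - 2) := by omega
        rw [if_pos hdbl, if_neg hcond]
        have := ih (p ++ [(ip, hop)]) d hfull' (by
          intro ip'
          rw [hd ip']
          cases h' : pvFirstIdx p ip' with
          | some k => rw [pvFirstIdx_append_some _ h']
          | none =>
            rw [pvFirstIdx_append_none _ h']
            by_cases hip' : ip = ip'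
            · subst hip'; rw [h'] at hp; simp at hp
            · simp [pvFirstIdx, hip'])
        rw [hlen] at this
        exact this
      · -- loop detected: both return (i, current pair)
        have hcond : (j : Int) ≤ (p.length : Int) - 2 := by omega
        simp [hdbl, hcond]

-- ===== VERDICT (by name: the statement is the Claim_ definition above) =====
theorem compute_ip_loop_spec : Claim_equal_compute_ip_loop := by
  intro l _
  show compute_ip_loop l = compute_ip_loop_alt l
  unfold compute_ip_loop compute_ip_loop_alt
  have hD : ∀ ip, (pvBuildFirst l 0 PySem.Dict.empty).get? ip =
      (pvFirstIdx l ip).map (fun k => (k : Int)) := by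
    intro ip
    rw [pvBuildFirst_get? l 0 PySem.Dict.empty ip]
    simp [PySem.Dict.get?_empty]
  have := pvKey l (pvBuildFirst l 0 PySem.Dict.empty) hD l [] PySem.Dict.empty (by simp)
    (by intro ip; simp [pvFirstIdx, PySem.Dict.get?_empty])
  simpa using this
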